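-- pv_equiv track=rewrite | github.com/Routherman/ADT_Bot_click | nav_pro.py | clean_email_value
-- ===== SOURCE A (Python) =====
-- def clean_email_value(s: str) -> str:
--     if not s:
--         return s
--     t = (s or "").strip()
--     # remover múltiples %20 al inicio
--     while t.lower().startswith("%20"):
--         t = t[3:].lstrip()
--     # remover prefijos '20' repetidos si el resto parece un email
--     # Evitar dañar emails válidos que inicien con números (heurística: solo si luego hay '@')
--     while t.startswith("20") and ("@" in t[2:]):
--         t = t[2:].lstrip()
--     # quitar separadores residuales comunes
--     t = t.strip().strip(",;|")
--     return t
-- ===== SOURCE B (Python) =====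
-- def _skip(s, p, i, j):
--     # advance i over chars of s[i:j] satisfying p
--     while i < j and p(s[i]):
--         i += 1
--     return i
--
--
-- def _trim(s, p, i, j):
--     # retreat j over trailing chars of s[i:j] satisfying p
--     while j > i and p(s[j - 1]):
--         j -= 1
--     return j
--
--
-- def clean_email_value(s: str) -> str:
--     # Index-based single scan: move two pointers i, j over s instead of
--     # repeatedly slicing and re-allocating strings; one slice at the end.
--     if not s:
--         return s
--     ws = str.isspace
--     sep = ",;|".__contains__
--     i = _skip(s, ws, 0, len(s))
--     j = _trim(s, ws, i, len(s))
--     # leading "%20" groups (each may be followed by whitespace)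
--     while i + 3 <= j and s[i] == '%' and s[i + 1] == '2' and s[i + 2] == '0':
--         i = _skip(s, ws, i + 3, j)
--     # leading "20" groups, only when an '@' is present in the region
--     if '@' in s[i:j]:
--         while i + 2 <= j and s[i] == '2' and s[i + 1] == '0':
--             i = _skip(s, ws, i + 2, j)
--     # residual separators ",;|" at both ends
--     i = _skip(s, sep, i, j)
--     j = _trim(s, sep, i, j)
--     return s[i:j]
-- ===== Notes on version B (the rewrite author's own statement) =====
-- stated objective: alternative
-- what changed: B replaces A's repeated slice-and-reallocate while-loops and final double strip by two index pointers moved over the original string, hoists the loop-invariant at-sign test out of the second loop, and takes one single slice at the end.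
import Mathlib
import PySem

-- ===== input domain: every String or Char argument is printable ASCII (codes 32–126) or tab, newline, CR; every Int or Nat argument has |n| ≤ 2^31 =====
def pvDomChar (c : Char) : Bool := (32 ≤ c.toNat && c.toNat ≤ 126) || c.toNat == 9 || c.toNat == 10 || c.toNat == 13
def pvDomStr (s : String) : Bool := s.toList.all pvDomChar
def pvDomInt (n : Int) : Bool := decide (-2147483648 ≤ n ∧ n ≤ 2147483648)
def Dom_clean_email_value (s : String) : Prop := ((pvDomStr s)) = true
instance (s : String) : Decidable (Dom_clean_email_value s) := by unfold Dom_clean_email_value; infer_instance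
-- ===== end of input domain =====

-- B replaces A's repeated slice-and-reallocate while-loops by two index pointers moved
-- over the original string, with a single slice at the end (objective: alternative algorithm).

-- ===== PORT A =====
-- while t.lower().startswith("%20"): t = t[3:].lstrip()
def aLoop1 (t : List Char) : List Char :=
  if PySem.Chars.startswith (PySem.Chars.lower t) ['%', '2', '0'] then
    aLoop1 (PySem.Chars.lstrip (PySem.List.slice t (some 3) none))
  else t
termination_by t.length
decreasing_by
  rename_i h
  rw [PySem.Chars.startswith_iff] at h
  have h3 : 3 ≤ t.length := by simpa [PySem.Chars.lower] using h.length_le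
  have hs : PySem.List.slice t (some 3) none = t.drop (Int.toNat 3) := PySem.List.slice_from _ (by norm_num)
  simp only [PySem.Chars.lstrip, hs, show Int.toNat 3 = 3 from rfl]
  have h1 := List.length_dropWhile_le PySem.Chars.isspace (t.drop 3)
  have h2 := List.length_drop (l := t) (i := 3)
  omega

-- while t.startswith("20") and ("@" in t[2:]): t = t[2:].lstrip()
def aLoop2 (t : List Char) : List Char :=
  if PySem.Chars.startswith t ['2', '0'] && PySem.Chars.isIn ['@'] (PySem.List.slice t (some 2) none) then
    aLoop2 (PySem.Chars.lstrip (PySem.List.slice t (some 2) none))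
  else t
termination_by t.length
decreasing_by
  rename_i h
  rw [Bool.and_eq_true, PySem.Chars.startswith_iff] at h
  have h2 : 2 ≤ t.length := h.1.length_le
  have hs : PySem.List.slice t (some 2) none = t.drop (Int.toNat 2) := PySem.List.slice_from _ (by norm_num)
  simp only [PySem.Chars.lstrip, hs, show Int.toNat 2 = 2 from rfl]
  have h1 := List.length_dropWhile_le PySem.Chars.isspace (t.drop 2)
  have h3 := List.length_drop (l := t) (i := 2)
  omega

def clean_email_value (s : String) : String :=
  if PySem.Str.len s = 0 then s             -- if not s: return s
  else
    let t := PySem.Chars.strip s.toList     -- t = (s or "").strip()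
    let t := aLoop1 t
    let t := aLoop2 t
    String.ofList (PySem.Chars.stripChars (PySem.Chars.strip t) [',', ';', '|'])  -- t.strip().strip(",;|")

-- ===== PORT B =====
-- def _skip(s, p, i, j): while i < j and p(s[i]): i += 1; return i
-- (s[i] is always in range here: callers keep i < j ≤ len(s), so getD's default is never read)
def bSkip (cs : List Char) (p : Char → Bool) (i j : Nat) : Nat :=
  if h : i < j ∧ p (cs.getD i ' ') then bSkip cs p (i + 1) j else i
termination_by j - i
decreasing_by omega

-- def _trim(s, p, i, j): while j > i and p(s[j-1]): j -= 1; return j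
def bTrim (cs : List Char) (p : Char → Bool) (i j : Nat) : Nat :=
  if h : i < j ∧ p (cs.getD (j - 1) ' ') then bTrim cs p i (j - 1) else j
termination_by j
decreasing_by omega

-- the ports of B's two while-loops need this bound for termination
theorem bSkip_ge (cs : List Char) (p : Char → Bool) (i j : Nat) : i ≤ bSkip cs p i j := by
  induction i using bSkip.induct (cs := cs) (p := p) (j := j) with
  | case1 x hx ih => rw [bSkip, dif_pos hx]; omega
  | case2 x hx => rw [bSkip, dif_neg hx]

-- while i + 3 <= j and s[i] == '%' and s[i+1] == '2' and s[i+2] == '0': i = _skip(s, ws, i+3, j)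
def bLoopPct (cs : List Char) (j i : Nat) : Nat :=
  if h : i + 3 ≤ j ∧ cs.getD i ' ' = '%' ∧ cs.getD (i + 1) ' ' = '2' ∧ cs.getD (i + 2) ' ' = '0' then
    bLoopPct cs j (bSkip cs PySem.Chars.isspace (i + 3) j)
  else i
termination_by j - i
decreasing_by have := bSkip_ge cs PySem.Chars.isspace (i + 3) j; omega

-- while i + 2 <= j and s[i] == '2' and s[i+1] == '0': i = _skip(s, ws, i+2, j)
def bLoop20 (cs : List Char) (j i : Nat) : Nat :=
  if h : i + 2 ≤ j ∧ cs.getD i ' ' = '2' ∧ cs.getD (i + 1) ' ' = '0' then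
    bLoop20 cs j (bSkip cs PySem.Chars.isspace (i + 2) j)
  else i
termination_by j - i
decreasing_by have := bSkip_ge cs PySem.Chars.isspace (i + 2) j; omega

def clean_email_value_alt (s : String) : String :=
  if PySem.Str.len s = 0 then s             -- if not s: return s
  else
    let cs := s.toList
    let i0 := bSkip cs PySem.Chars.isspace 0 cs.length
    let j0 := bTrim cs PySem.Chars.isspace i0 cs.length
    let i1 := bLoopPct cs j0 i0
    let i2 := if PySem.Chars.isIn ['@'] (PySem.List.slice cs (some (i1 : Int)) (some (j0 : Int))) then
                bLoop20 cs j0 i1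
              else i1
    let i3 := bSkip cs (fun c => PySem.Chars.isIn [c] [',', ';', '|']) i2 j0
    let j1 := bTrim cs (fun c => PySem.Chars.isIn [c] [',', ';', '|']) i3 j0
    String.ofList (PySem.List.slice cs (some (i3 : Int)) (some (j1 : Int)))

-- ===== PRECONDITION & SPEC =====
def Spec_clean_email_value (s : String) (out : String) : Prop := out = clean_email_value_alt s
instance (s : String) (out : String) : Decidable (Spec_clean_email_value s out) := by unfold Spec_clean_email_value; infer_instance

-- ===== CLAIM (what is proved, stated in full; the proofs are below) =====
def Claim_equal_clean_email_value : Prop := ∀ (s : String), Dom_clean_email_value s → Spec_clean_email_value s (clean_email_value s)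

-- ===== LEMMAS AND PROOFS =====

-- the region s[i:j] of the character list: the value B's pointer pair (i, j) denotes
def rg (cs : List Char) (i j : Nat) : List Char := (cs.drop i).take (j - i)

theorem rg_nil (cs : List Char) {i j : Nat} (h : j ≤ i) : rg cs i j = [] := by
  simp [rg, Nat.sub_eq_zero_of_le h]

theorem rg_all (cs : List Char) : rg cs 0 cs.length = cs := by
  simp [rg]

theorem rg_cons (cs : List Char) {i j : Nat} (h : i < j) (hl : i < cs.length) :
    rg cs i j = cs[i] :: rg cs (i + 1) j := by
  unfold rg
  rw [List.drop_eq_getElem_cons hl, show j - i = (j - (i + 1)) + 1 by omega, List.take_succ_cons]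

theorem rg_snoc (cs : List Char) {i j : Nat} (h : i < j) (hj : j ≤ cs.length) :
    rg cs i j = rg cs i (j - 1) ++ [cs[j - 1]'(by omega)] := by
  unfold rg
  rw [show j - i = (j - 1 - i) + 1 by omega, List.take_add_one]
  congr 1
  rw [List.getElem?_drop, show i + (j - 1 - i) = j - 1 by omega,
    List.getElem?_eq_getElem (by omega)]
  rfl

theorem rg_drop (cs : List Char) (i j k : Nat) : (rg cs i j).drop k = rg cs (i + k) j := by
  unfold rg
  rw [List.drop_take, List.drop_drop, show i + k = k + i by omega,
    show j - i - k = j - (k + i) by omega]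

theorem bSkip_le (cs : List Char) (p : Char → Bool) (i j : Nat) : i ≤ j → bSkip cs p i j ≤ j := by
  induction i using bSkip.induct (cs := cs) (p := p) (j := j) with
  | case1 x hx ih => intro _; rw [bSkip, dif_pos hx]; exact ih (by omega)
  | case2 x hx => intro h; rw [bSkip, dif_neg hx]; exact h

theorem bSkip_rg (cs : List Char) (p : Char → Bool) {j : Nat} (hj : j ≤ cs.length) :
    ∀ i, i ≤ j → rg cs (bSkip cs p i j) j = (rg cs i j).dropWhile p := by
  intro i
  induction i using bSkip.induct (cs := cs) (p := p) (j := j) with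
  | case1 x hx ih =>
    intro hij
    have hxl : x < cs.length := by omega
    rw [bSkip, dif_pos hx, rg_cons cs hx.1 hxl, List.dropWhile_cons]
    have hp : p cs[x] = true := by rw [← List.getD_eq_getElem cs ' ' hxl]; exact hx.2
    rw [hp, if_pos rfl]
    exact ih (by omega)
  | case2 x hx =>
    intro hij
    rw [bSkip, dif_neg hx]
    rcases Nat.eq_or_lt_of_le hij with rfl | hlt
    · rw [rg_nil cs (le_refl _)]; rfl
    · have hxl : x < cs.length := by omega
      have hp : p cs[x] = false := by
        rw [← List.getD_eq_getElem cs ' ' hxl]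
        rcases Bool.eq_false_or_eq_true (p (cs.getD x ' ')) with h | h
        · exact absurd ⟨hlt, h⟩ hx
        · exact h
      rw [rg_cons cs hlt hxl, List.dropWhile_cons, hp]
      simp

theorem bSkip_post (cs : List Char) (p : Char → Bool) (i j : Nat) :
    bSkip cs p i j < j → p (cs.getD (bSkip cs p i j) ' ') = false := by
  induction i using bSkip.induct (cs := cs) (p := p) (j := j) with
  | case1 x hx ih => rw [bSkip, dif_pos hx]; exact ih
  | case2 x hx =>
    rw [bSkip, dif_neg hx]
    intro hlt
    rcases Bool.eq_false_or_eq_true (p (cs.getD x ' ')) with h | h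
    · exact absurd ⟨hlt, h⟩ hx
    · exact h

theorem bTrim_ge (cs : List Char) (p : Char → Bool) (i j : Nat) : i ≤ j → i ≤ bTrim cs p i j := by
  induction j using bTrim.induct (cs := cs) (p := p) (i := i) with
  | case1 x hx ih => intro _; rw [bTrim, dif_pos hx]; exact ih (by omega)
  | case2 x hx => intro h; rw [bTrim, dif_neg hx]; exact h

theorem bTrim_le (cs : List Char) (p : Char → Bool) (i j : Nat) : bTrim cs p i j ≤ j := by
  induction j using bTrim.induct (cs := cs) (p := p) (i := i) with
  | case1 x hx ih => rw [bTrim, dif_pos hx]; omega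
  | case2 x hx => rw [bTrim, dif_neg hx]

theorem bTrim_rg (cs : List Char) (p : Char → Bool) {i : Nat} (_hi : i ≤ cs.length) :
    ∀ j, i ≤ j → j ≤ cs.length →
      rg cs i (bTrim cs p i j) = ((rg cs i j).reverse.dropWhile p).reverse := by
  intro j
  induction j using bTrim.induct (cs := cs) (p := p) (i := i) with
  | case1 x hx ih =>
    intro hij hxl
    have hxm : x - 1 < cs.length := by omega
    rw [bTrim, dif_pos hx, rg_snoc cs hx.1 hxl, List.reverse_append, List.reverse_singleton,
      List.singleton_append, List.dropWhile_cons]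
    have hp : p cs[x - 1] = true := by rw [← List.getD_eq_getElem cs ' ' hxm]; exact hx.2
    rw [hp, if_pos rfl]
    exact ih (by omega) (by omega)
  | case2 x hx =>
    intro hij hxl
    rw [bTrim, dif_neg hx]
    rcases Nat.eq_or_lt_of_le hij with rfl | hlt
    · rw [rg_nil cs (le_refl _)]; rfl
    · have hxm : x - 1 < cs.length := by omega
      have hp : p cs[x - 1] = false := by
        rw [← List.getD_eq_getElem cs ' ' hxm]
        rcases Bool.eq_false_or_eq_true (p (cs.getD (x - 1) ' ')) with h | h
        · exact absurd ⟨hlt, h⟩ hx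
        · exact h
      rw [rg_snoc cs hlt hxl, List.reverse_append, List.reverse_singleton,
        List.singleton_append, List.dropWhile_cons, hp]
      simp

theorem bTrim_post (cs : List Char) (p : Char → Bool) (i j : Nat) :
    i < bTrim cs p i j → p (cs.getD (bTrim cs p i j - 1) ' ') = false := by
  induction j using bTrim.induct (cs := cs) (p := p) (i := i) with
  | case1 x hx ih => rw [bTrim, dif_pos hx]; exact ih
  | case2 x hx =>
    rw [bTrim, dif_neg hx]
    intro hlt
    rcases Bool.eq_false_or_eq_true (p (cs.getD (x - 1) ' ')) with h | h
    · exact absurd ⟨hlt, h⟩ hx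
    · exact h

theorem lowerChar_eq_iff {a d : Char} (hd : d.toNat < 65) : PySem.Chars.lowerChar a = d ↔ a = d := by
  unfold PySem.Chars.lowerChar PySem.Chars.isupper
  by_cases h : ('A' ≤ a) ∧ (a ≤ 'Z')
  · rw [if_pos (by simp [h.1, h.2])]
    have hA : 65 ≤ a.toNat := h.1
    have hZ : a.toNat ≤ 90 := h.2
    have hv : (a.toNat + 32).isValidChar := Or.inl (by omega)
    constructor
    · intro he
      have := congrArg Char.toNat he
      rw [Char.toNat_ofNat, if_pos hv] at this
      omega
    · intro he; subst he; exact absurd hA (by omega)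
  · rw [if_neg (by simpa using h)]

theorem lowerChar_eq_iff' (a : Char) {d : Char} (hd : d.toNat < 65) :
    (d = PySem.Chars.lowerChar a) ↔ (d = a) := by
  rw [eq_comm, lowerChar_eq_iff hd, eq_comm]

theorem lowerStarts (t : List Char) :
    PySem.Chars.startswith (PySem.Chars.lower t) ['%', '2', '0'] =
      PySem.Chars.startswith t ['%', '2', '0'] := by
  rcases t with _ | ⟨a, _ | ⟨b, _ | ⟨c, r⟩⟩⟩
  · rfl
  · simp [PySem.Chars.startswith, PySem.Chars.lower, List.isPrefixOf]
  · simp [PySem.Chars.startswith, PySem.Chars.lower, List.isPrefixOf]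
  · simp only [PySem.Chars.startswith, PySem.Chars.lower, List.map, List.isPrefixOf]
    rw [Bool.eq_iff_iff]
    simp only [Bool.and_eq_true, beq_iff_eq]
    rw [lowerChar_eq_iff' a (by decide), lowerChar_eq_iff' b (by decide),
      lowerChar_eq_iff' c (by decide)]

theorem isIn_singleton_iff (c : Char) (l : List Char) : PySem.Chars.isIn [c] l = true ↔ c ∈ l := by
  rw [PySem.Chars.isIn_iff_infix, List.singleton_infix_iff]

theorem starts3 (cs : List Char) (a b c : Char) {i j : Nat} (hj : j ≤ cs.length) :
    PySem.Chars.startswith (rg cs i j) [a, b, c] = true ↔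
      i + 3 ≤ j ∧ cs.getD i ' ' = a ∧ cs.getD (i + 1) ' ' = b ∧ cs.getD (i + 2) ' ' = c := by
  rcases Nat.lt_or_ge i j with h1 | h1
  · rw [rg_cons cs h1 (by omega)]
    rcases Nat.lt_or_ge (i + 1) j with h2 | h2
    · rw [rg_cons cs h2 (by omega)]
      rcases Nat.lt_or_ge (i + 2) j with h3 | h3
      · rw [rg_cons cs h3 (by omega)]
        simp only [PySem.Chars.startswith, List.isPrefixOf, Bool.and_eq_true, beq_iff_eq,
          List.getD_eq_getElem cs ' ' (show i < cs.length by omega),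
          List.getD_eq_getElem cs ' ' (show i + 1 < cs.length by omega),
          List.getD_eq_getElem cs ' ' (show i + 2 < cs.length by omega)]
        constructor
        · rintro ⟨ha, hb, hc, -⟩
          exact ⟨by omega, ha.symm, hb.symm, hc.symm⟩
        · rintro ⟨-, ha, hb, hc⟩
          exact ⟨ha.symm, hb.symm, hc.symm, by simp⟩
      · rw [rg_nil cs h3]
        constructor
        · intro h; simp [PySem.Chars.startswith, List.isPrefixOf] at h
        · rintro ⟨h, -⟩; omega
    · rw [rg_nil cs h2]
      constructor
      · intro h; simp [PySem.Chars.startswith, List.isPrefixOf] at h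
      · rintro ⟨h, -⟩; omega
  · rw [rg_nil cs h1]
    constructor
    · intro h; simp [PySem.Chars.startswith, List.isPrefixOf] at h
    · rintro ⟨h, -⟩; omega

theorem starts2 (cs : List Char) (a b : Char) {i j : Nat} (hj : j ≤ cs.length) :
    PySem.Chars.startswith (rg cs i j) [a, b] = true ↔
      i + 2 ≤ j ∧ cs.getD i ' ' = a ∧ cs.getD (i + 1) ' ' = b := by
  rcases Nat.lt_or_ge i j with h1 | h1
  · rw [rg_cons cs h1 (by omega)]
    rcases Nat.lt_or_ge (i + 1) j with h2 | h2
    · rw [rg_cons cs h2 (by omega)]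
      simp only [PySem.Chars.startswith, List.isPrefixOf, Bool.and_eq_true, beq_iff_eq,
        List.getD_eq_getElem cs ' ' (show i < cs.length by omega),
        List.getD_eq_getElem cs ' ' (show i + 1 < cs.length by omega)]
      constructor
      · rintro ⟨ha, hb, -⟩
        exact ⟨by omega, ha.symm, hb.symm⟩
      · rintro ⟨-, ha, hb⟩
        exact ⟨ha.symm, hb.symm, by simp⟩
    · rw [rg_nil cs h2]
      constructor
      · intro h; simp [PySem.Chars.startswith, List.isPrefixOf] at h
      · rintro ⟨h, -⟩; omega
  · rw [rg_nil cs h1]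
    constructor
    · intro h; simp [PySem.Chars.startswith, List.isPrefixOf] at h
    · rintro ⟨h, -⟩; omega

theorem loop1_rg (cs : List Char) {j : Nat} (hj : j ≤ cs.length) :
    ∀ i, i ≤ j → aLoop1 (rg cs i j) = rg cs (bLoopPct cs j i) j := by
  intro i
  induction i using bLoopPct.induct (cs := cs) (j := j) with
  | case1 x hx ih =>
    intro hij
    rw [bLoopPct, dif_pos hx, aLoop1,
      if_pos (by rw [lowerStarts, starts3 cs '%' '2' '0' hj]; exact hx)]
    have hslice : PySem.List.slice (rg cs x j) (some 3) none = rg cs (x + 3) j := by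
      rw [PySem.List.slice_from _ (by norm_num), show Int.toNat 3 = 3 from rfl, rg_drop]
    rw [hslice, PySem.Chars.lstrip, ← bSkip_rg cs PySem.Chars.isspace hj (x + 3) hx.1]
    exact ih (bSkip_le cs PySem.Chars.isspace (x + 3) j hx.1)
  | case2 x hx =>
    intro hij
    rw [bLoopPct, dif_neg hx, aLoop1, if_neg]
    rw [lowerStarts]
    intro hc
    exact hx ((starts3 cs '%' '2' '0' hj).mp hc)

theorem loop2_rg (cs : List Char) {j : Nat} (hj : j ≤ cs.length) :
    ∀ i, i ≤ j → '@' ∈ rg cs i j → aLoop2 (rg cs i j) = rg cs (bLoop20 cs j i) j := by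
  intro i
  induction i using bLoop20.induct (cs := cs) (j := j) with
  | case1 x hx ih =>
    intro hij hat
    have hx2 : x + 2 ≤ j := hx.1
    have hdrop : PySem.List.slice (rg cs x j) (some 2) none = rg cs (x + 2) j := by
      rw [PySem.List.slice_from _ (by norm_num), show Int.toNat 2 = 2 from rfl, rg_drop]
    have hrest : '@' ∈ rg cs (x + 2) j := by
      have e1 : rg cs x j = cs[x]'(by omega) :: cs[x + 1]'(by omega) :: rg cs (x + 2) j := by
        rw [rg_cons cs (by omega) (by omega), rg_cons cs (by omega) (by omega)]
      rw [e1] at hat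
      have c1 : cs[x]'(by omega) = '2' := by
        rw [← List.getD_eq_getElem cs ' ' (by omega)]; exact hx.2.1
      have c2 : cs[x + 1]'(by omega) = '0' := by
        rw [← List.getD_eq_getElem cs ' ' (by omega)]; exact hx.2.2
      rcases List.mem_cons.mp hat with h | h
      · exact absurd (h.trans c1) (by decide)
      · rcases List.mem_cons.mp h with h2 | h2
        · exact absurd (h2.trans c2) (by decide)
        · exact h2
    rw [bLoop20, dif_pos hx, aLoop2, if_pos]
    · rw [hdrop, PySem.Chars.lstrip, ← bSkip_rg cs PySem.Chars.isspace hj (x + 2) hx2]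
      apply ih (bSkip_le cs PySem.Chars.isspace (x + 2) j hx2)
      rw [bSkip_rg cs PySem.Chars.isspace hj (x + 2) hx2]
      have hsplit := List.takeWhile_append_dropWhile (p := PySem.Chars.isspace) (l := rg cs (x + 2) j)
      rcases List.mem_append.mp (by rw [hsplit]; exact hrest) with h1 | h2
      · exact absurd (List.mem_takeWhile_imp h1) (by decide)
      · exact h2
    · rw [Bool.and_eq_true]
      refine ⟨(starts2 cs '2' '0' hj).mpr ⟨hx.1, hx.2.1, hx.2.2⟩, ?_⟩
      rw [hdrop]
      exact (isIn_singleton_iff '@' _).mpr hrest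
  | case2 x hx =>
    intro hij hat
    rw [bLoop20, dif_neg hx, aLoop2, if_neg]
    rw [Bool.and_eq_true]
    rintro ⟨hs, -⟩
    exact hx ((starts2 cs '2' '0' hj).mp hs)

theorem loop2_skip (t : List Char) (hat : ¬ '@' ∈ t) : aLoop2 t = t := by
  rw [aLoop2, if_neg]
  rw [Bool.and_eq_true]
  rintro ⟨-, hin⟩
  rw [PySem.List.slice_from _ (by norm_num), show Int.toNat 2 = 2 from rfl] at hin
  exact hat (List.mem_of_mem_drop ((isIn_singleton_iff '@' _).mp hin))

theorem bLoopPct_ge (cs : List Char) (j i : Nat) : i ≤ bLoopPct cs j i := by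
  induction i using bLoopPct.induct (cs := cs) (j := j) with
  | case1 x hx ih =>
    rw [bLoopPct, dif_pos hx]
    have := bSkip_ge cs PySem.Chars.isspace (x + 3) j
    omega
  | case2 x hx => rw [bLoopPct, dif_neg hx]

theorem bLoopPct_le (cs : List Char) (j i : Nat) (h : i ≤ j) : bLoopPct cs j i ≤ j := by
  induction i using bLoopPct.induct (cs := cs) (j := j) with
  | case1 x hx ih => rw [bLoopPct, dif_pos hx]; exact ih (bSkip_le cs PySem.Chars.isspace (x + 3) j hx.1)
  | case2 x hx => rw [bLoopPct, dif_neg hx]; exact h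

theorem bLoopPct_post (cs : List Char) (j i : Nat)
    (h : i < j → PySem.Chars.isspace (cs.getD i ' ') = false) :
    bLoopPct cs j i < j → PySem.Chars.isspace (cs.getD (bLoopPct cs j i) ' ') = false := by
  induction i using bLoopPct.induct (cs := cs) (j := j) with
  | case1 x hx ih =>
    rw [bLoopPct, dif_pos hx]
    exact ih (fun _ => bSkip_post cs PySem.Chars.isspace (x + 3) j (by
      have := bSkip_le cs PySem.Chars.isspace (x + 3) j hx.1
      omega))
  | case2 x hx => rw [bLoopPct, dif_neg hx]; exact h

theorem bLoop20_ge (cs : List Char) (j i : Nat) : i ≤ bLoop20 cs j i := by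
  induction i using bLoop20.induct (cs := cs) (j := j) with
  | case1 x hx ih =>
    rw [bLoop20, dif_pos hx]
    have := bSkip_ge cs PySem.Chars.isspace (x + 2) j
    omega
  | case2 x hx => rw [bLoop20, dif_neg hx]

theorem bLoop20_le (cs : List Char) (j i : Nat) (h : i ≤ j) : bLoop20 cs j i ≤ j := by
  induction i using bLoop20.induct (cs := cs) (j := j) with
  | case1 x hx ih => rw [bLoop20, dif_pos hx]; exact ih (bSkip_le cs PySem.Chars.isspace (x + 2) j hx.1)
  | case2 x hx => rw [bLoop20, dif_neg hx]; exact h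

theorem bLoop20_post (cs : List Char) (j i : Nat)
    (h : i < j → PySem.Chars.isspace (cs.getD i ' ') = false) :
    bLoop20 cs j i < j → PySem.Chars.isspace (cs.getD (bLoop20 cs j i) ' ') = false := by
  induction i using bLoop20.induct (cs := cs) (j := j) with
  | case1 x hx ih =>
    rw [bLoop20, dif_pos hx]
    exact ih (fun _ => bSkip_post cs PySem.Chars.isspace (x + 2) j (by
      have := bSkip_le cs PySem.Chars.isspace (x + 2) j hx.1
      omega))
  | case2 x hx => rw [bLoop20, dif_neg hx]; exact h

theorem sepFun_eq :
    (fun c => PySem.Chars.isIn [c] [',', ';', '|']) = (fun c : Char => List.contains [',', ';', '|'] c) := by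
  funext c
  rw [Bool.eq_iff_iff, isIn_singleton_iff, List.contains_iff_mem]

theorem final_rg (cs : List Char) {j : Nat} (hj : j ≤ cs.length) (i : Nat) (hij : i ≤ j) :
    String.ofList (PySem.Chars.stripChars (rg cs i j) [',', ';', '|']) =
      String.ofList (PySem.List.slice cs
        (some ((bSkip cs (fun c => PySem.Chars.isIn [c] [',', ';', '|']) i j : Nat) : Int))
        (some ((bTrim cs (fun c => PySem.Chars.isIn [c] [',', ';', '|'])
          (bSkip cs (fun c => PySem.Chars.isIn [c] [',', ';', '|']) i j) j : Nat) : Int))) := by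
  apply congrArg
  rw [PySem.List.slice_natCast, PySem.Chars.stripChars]
  simp only [← sepFun_eq]
  rw [← bSkip_rg cs _ hj i hij,
    ← bTrim_rg cs _ (le_trans (bSkip_le cs _ i j hij) hj) j (bSkip_le cs _ i j hij) hj]
  rfl

-- a region whose first and last characters are not whitespace is fixed by strip
theorem strip_rg (cs : List Char) {i j : Nat} (hj : j ≤ cs.length)
    (hhead : i < j → PySem.Chars.isspace (cs.getD i ' ') = false)
    (hlast : i < j → PySem.Chars.isspace (cs.getD (j - 1) ' ') = false) :
    PySem.Chars.strip (rg cs i j) = rg cs i j := by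
  rcases Nat.lt_or_ge i j with hlt | hge
  · rw [PySem.Chars.strip, PySem.Chars.lstrip, PySem.Chars.rstrip]
    have e1 : List.dropWhile PySem.Chars.isspace (rg cs i j) = rg cs i j := by
      rw [rg_cons cs hlt (by omega), List.dropWhile_cons]
      have : PySem.Chars.isspace cs[i] = false := by
        rw [← List.getD_eq_getElem cs ' ' (by omega)]; exact hhead hlt
      simp [this]
    rw [e1, rg_snoc cs hlt hj, List.reverse_append, List.reverse_singleton,
      List.singleton_append, List.dropWhile_cons]
    have : PySem.Chars.isspace (cs[j - 1]'(by omega)) = false := by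
      rw [← List.getD_eq_getElem cs ' ' (by omega)]; exact hlast hlt
    simp [this]
  · rw [rg_nil cs hge]; rfl

-- ===== VERDICT (by name: the statement is the Claim_ definition above) =====
theorem clean_email_value_spec : Claim_equal_clean_email_value := by
  intro s _
  unfold Spec_clean_email_value clean_email_value clean_email_value_alt
  by_cases h0 : PySem.Str.len s = 0
  · rw [if_pos h0, if_pos h0]
  · rw [if_neg h0, if_neg h0]
    simp only []
    set cs := s.toList with hcs
    set i0 := bSkip cs PySem.Chars.isspace 0 cs.length with hi0
    set j0 := bTrim cs PySem.Chars.isspace i0 cs.length with hj0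
    have hi0n : i0 ≤ cs.length := bSkip_le cs PySem.Chars.isspace 0 cs.length (Nat.zero_le _)
    have hj0n : j0 ≤ cs.length := bTrim_le cs PySem.Chars.isspace i0 cs.length
    have hi0j0 : i0 ≤ j0 := bTrim_ge cs PySem.Chars.isspace i0 cs.length hi0n
    set i1 := bLoopPct cs j0 i0 with hi1
    have hi1j0 : i1 ≤ j0 := bLoopPct_le cs j0 i0 hi0j0
    have hi0i1 : i0 ≤ i1 := bLoopPct_ge cs j0 i0
    -- step 1: strip = the two trims
    have e1 : PySem.Chars.strip cs = rg cs i0 j0 := by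
      rw [PySem.Chars.strip, PySem.Chars.lstrip, PySem.Chars.rstrip]
      have d1 : List.dropWhile PySem.Chars.isspace cs = rg cs i0 cs.length := by
        conv_lhs => rw [← rg_all cs]
        rw [← bSkip_rg cs PySem.Chars.isspace (le_refl cs.length) 0 (Nat.zero_le _)]
      rw [d1, ← bTrim_rg cs PySem.Chars.isspace hi0n cs.length hi0n (le_refl _)]
    -- step 2: the %20 loop
    have e2 : aLoop1 (rg cs i0 j0) = rg cs i1 j0 := loop1_rg cs hj0n i0 hi0j0
    -- the slice in B's '@' test is the region
    have hsl : PySem.List.slice cs (some (i1 : Int)) (some (j0 : Int)) = rg cs i1 j0 := by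
      rw [PySem.List.slice_natCast]; rfl
    rw [e1, e2, hsl]
    -- whitespace posts
    have post0 : i0 < j0 → PySem.Chars.isspace (cs.getD i0 ' ') = false := fun h =>
      bSkip_post cs PySem.Chars.isspace 0 cs.length (by omega)
    have post1 : i1 < j0 → PySem.Chars.isspace (cs.getD i1 ' ') = false :=
      bLoopPct_post cs j0 i0 post0
    have postj : i0 < j0 → PySem.Chars.isspace (cs.getD (j0 - 1) ' ') = false := fun h =>
      bTrim_post cs PySem.Chars.isspace i0 cs.length h
    -- step 3: the 20 loop (or not), then the final strips
    by_cases hat : PySem.Chars.isIn ['@'] (rg cs i1 j0) = true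
    · rw [if_pos hat]
      set i2 := bLoop20 cs j0 i1 with hi2
      have hi2j0 : i2 ≤ j0 := bLoop20_le cs j0 i1 hi1j0
      have hi1i2 : i1 ≤ i2 := bLoop20_ge cs j0 i1
      have e3 : aLoop2 (rg cs i1 j0) = rg cs i2 j0 :=
        loop2_rg cs hj0n i1 hi1j0 ((isIn_singleton_iff '@' _).mp hat)
      have post2 : i2 < j0 → PySem.Chars.isspace (cs.getD i2 ' ') = false :=
        bLoop20_post cs j0 i1 post1
      rw [e3, strip_rg cs hj0n post2 (fun h => postj (by omega)),
        final_rg cs hj0n i2 hi2j0]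
    · rw [if_neg hat]
      have e3 : aLoop2 (rg cs i1 j0) = rg cs i1 j0 :=
        loop2_skip _ (fun hm => hat ((isIn_singleton_iff '@' _).mpr hm))
      rw [e3, strip_rg cs hj0n post1 (fun h => postj (by omega)),
        final_rg cs hj0n i1 hi1j0]
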